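-- pv_equiv track=rewrite | github.com/sntnmjones/RentalApp-a | main/utils/address_utils.py | split_street
-- ===== SOURCE A (Python) =====
-- from typing import Tuple, List
--
-- def split_street(street: str) -> Tuple[str, str]:
--     """
--     Separate the street name and number, leaving dashes in place for storage
--     """
--     parts: List[str] = street.split("-")
--     street_name_parts: List[str] = []
--     while parts and not parts[-1].isdigit():
--         street_name_parts.append(parts.pop())
--     street_name: str = "-".join(reversed(street_name_parts))
--     street_number: str = "-".join(parts)
--     return street_number, street_name
-- ===== SOURCE B (Python) =====
-- from typing import Tuple, List
--
-- def split_street(street: str) -> Tuple[str, str]: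
--     """
--     Separate the street name and number, leaving dashes in place for storage
--     """
--     parts: List[str] = street.split("-")
--     cut = 0
--     i = 0
--     for p in parts:
--         i += 1
--         if p.isdigit():
--             cut = i
--     return "-".join(parts[:cut]), "-".join(parts[cut:])
-- ===== Notes on version B (the rewrite author's own statement) =====
-- stated objective: simpler
-- what changed: Replaces A's destructive while-loop that pops trailing non-digit segments onto a stack and reverses it with a single forward pass that records the cut index after the last all-digit segment, then returns the two joined slices.
import Mathlib
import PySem

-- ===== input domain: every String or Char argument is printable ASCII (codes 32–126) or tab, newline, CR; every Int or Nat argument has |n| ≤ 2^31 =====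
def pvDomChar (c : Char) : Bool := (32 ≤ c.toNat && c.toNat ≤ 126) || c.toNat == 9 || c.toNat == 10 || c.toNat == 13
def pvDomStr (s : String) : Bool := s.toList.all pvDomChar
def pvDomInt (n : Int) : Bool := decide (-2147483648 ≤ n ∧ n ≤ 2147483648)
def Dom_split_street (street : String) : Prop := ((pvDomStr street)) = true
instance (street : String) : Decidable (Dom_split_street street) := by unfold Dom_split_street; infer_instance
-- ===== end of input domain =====

-- B replaces A's pop-and-reverse stack with a single forward pass that records the cut index
-- after the last all-digit segment, then slices (objective: simpler; return values equal everywhere).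

-- ===== PORT A =====
-- the while loop: pop trailing non-digit segments onto an accumulator (strings handled as List Char via PySem.Chars)
def splitLoopA : List (List Char) → List (List Char) → List (List Char) × List (List Char)
  | [], acc => ([], acc)
  | p :: ps, acc =>
    if PySem.Chars.strIsdigit ((p :: ps).getLast (List.cons_ne_nil p ps)) then (p :: ps, acc)
    else splitLoopA (p :: ps).dropLast (acc ++ [(p :: ps).getLast (List.cons_ne_nil p ps)])
termination_by parts _ => parts.length
decreasing_by simp

def split_street (street : String) : String × String :=
  let parts := PySem.Chars.splitOn street.toList ['-']
  let r := splitLoopA parts []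
  (String.ofList (PySem.Chars.join ['-'] r.1), String.ofList (PySem.Chars.join ['-'] r.2.reverse))

-- ===== PORT B =====
def split_street_alt (street : String) : String × String :=
  let parts := PySem.Chars.splitOn street.toList ['-']
  let st := parts.foldl
    (fun (st : Int × Int) p => (st.1 + 1, if PySem.Chars.strIsdigit p then st.1 + 1 else st.2))
    (0, 0)
  (String.ofList (PySem.Chars.join ['-'] (PySem.List.slice parts none (some st.2))),
   String.ofList (PySem.Chars.join ['-'] (PySem.List.slice parts (some st.2) none)))

-- ===== PRECONDITION & SPEC =====
def Spec_split_street (street : String) (out : String × String) : Prop := out = split_street_alt street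
instance (street : String) (out : String × String) : Decidable (Spec_split_street street out) := by unfold Spec_split_street; infer_instance

-- ===== CLAIM (what is proved, stated in full; the proofs are below) =====
def Claim_equal_split_street : Prop := ∀ (street : String), Dom_split_street street → Spec_split_street street (split_street street)

-- ===== LEMMAS AND PROOFS =====

lemma splitLoopA_concat (l : List (List Char)) (x : List Char) (acc : List (List Char)) :
    splitLoopA (l ++ [x]) acc =
      if PySem.Chars.strIsdigit x then (l ++ [x], acc) else splitLoopA l (acc ++ [x]) := by
  cases l with
  | nil => simp [splitLoopA]
  | cons q qs =>
    show splitLoopA (q :: (qs ++ [x])) acc = _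
    rw [splitLoopA]
    simp only [← List.cons_append, List.getLast_concat, List.dropLast_concat]

lemma splitLoopA_eq (parts acc : List (List Char)) :
    splitLoopA parts acc =
      ((parts.reverse.dropWhile (fun s => !PySem.Chars.strIsdigit s)).reverse,
       acc ++ parts.reverse.takeWhile (fun s => !PySem.Chars.strIsdigit s)) := by
  induction parts using List.reverseRecOn generalizing acc with
  | nil => simp [splitLoopA]
  | append_singleton l x ih =>
    rw [splitLoopA_concat]
    by_cases hd : PySem.Chars.strIsdigit x
    · simp [hd]
    · simp [hd, ih]

lemma foldl_cut (l : List (List Char)) (i0 c : Int) :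
    l.foldl (fun (st : Int × Int) p =>
        (st.1 + 1, if PySem.Chars.strIsdigit p then st.1 + 1 else st.2)) (i0, c) =
      (i0 + l.length,
       if (l.reverse.takeWhile (fun s => !PySem.Chars.strIsdigit s)).length = l.length then c
       else i0 + ((l.length : Int) - (l.reverse.takeWhile (fun s => !PySem.Chars.strIsdigit s)).length)) := by
  induction l using List.reverseRecOn generalizing i0 c with
  | nil => simp
  | append_singleton l x ih =>
    rw [List.foldl_concat, ih]
    have hle : (l.reverse.takeWhile (fun s => !PySem.Chars.strIsdigit s)).length ≤ l.length := by
      have := (List.takeWhile_prefix (l := l.reverse) (fun s => !PySem.Chars.strIsdigit s)).length_le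
      simpa using this
    by_cases hd : PySem.Chars.strIsdigit x
    · have h1 : ((l ++ [x]).reverse.takeWhile (fun s => !PySem.Chars.strIsdigit s)).length = 0 := by
        simp [hd]
      simp only [hd, if_true, h1, List.length_append, List.length_singleton, Prod.mk.injEq]
      constructor
      · push_cast; omega
      · rw [if_neg (by omega)]; push_cast; omega
    · have htw : ((l ++ [x]).reverse.takeWhile (fun s => !PySem.Chars.strIsdigit s)).length
          = (l.reverse.takeWhile (fun s => !PySem.Chars.strIsdigit s)).length + 1 := by
        simp [hd]
      simp only [hd, htw, List.length_append, List.length_singleton, Prod.mk.injEq,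
        Bool.false_eq_true, if_false]
      constructor
      · push_cast; omega
      · split_ifs <;> push_cast <;> omega

-- ===== VERDICT (by name: the statement is the Claim_ definition above) =====
theorem split_street_spec : Claim_equal_split_street := by
  intro street _
  simp only [Spec_split_street, split_street, split_street_alt]
  rw [splitLoopA_eq, foldl_cut]
  set parts := PySem.Chars.splitOn street.toList ['-'] with hp
  set tw := parts.reverse.takeWhile (fun s => !PySem.Chars.strIsdigit s) with htw
  set dw := parts.reverse.dropWhile (fun s => !PySem.Chars.strIsdigit s) with hdw
  have hsplit : tw ++ dw = parts.reverse := List.takeWhile_append_dropWhile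
  have hlen : tw.length + dw.length = parts.length := by
    have := congrArg List.length hsplit; simpa using this
  have hparts : parts = dw.reverse ++ tw.reverse := by
    conv_lhs => rw [← List.reverse_reverse parts]
    rw [← hsplit, List.reverse_append]
  have hcut : (if tw.length = parts.length then (0:Int)
      else 0 + ((parts.length : Int) - tw.length)) = ((dw.length : Nat) : Int) := by
    split_ifs with h
    · omega
    · push_cast; omega
  rw [hcut]
  have h1 : PySem.List.slice parts none (some ((dw.length : Nat) : Int)) = dw.reverse := by
    rw [PySem.List.slice_to parts (by exact_mod_cast Nat.zero_le _)]
    rw [Int.toNat_natCast, hparts, List.take_left' (by simp)]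
  have h2 : PySem.List.slice parts (some ((dw.length : Nat) : Int)) none = tw.reverse := by
    rw [PySem.List.slice_from parts (by exact_mod_cast Nat.zero_le _)]
    rw [Int.toNat_natCast, hparts, List.drop_left' (by simp)]
  rw [h1, h2]
  simp
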